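-- pv_equiv track=rewrite | github.com/FiveEye/ProblemSet | LeetCode/lc992.py | find
-- ===== SOURCE A (Python) =====
-- def get(s, i):
--     ret = 0
--     while i != 0:
--         ret += s[i]
--         i -= (i&(-i))
--     return ret
--
-- def find(s, k):
--     n = len(s)
--     beg = 0
--     end = n
--     tt = get(s, n-1)
--     while beg < end:
--         mid = (beg + end) // 2
--         t = get(s, mid)
--         if tt - t >= k:
--             beg = mid + 1
--         else:
--             end = mid
--     return end
-- ===== SOURCE B (Python) =====
-- def find(s, k):
--     n = len(s)
--     # one linear pass turns the Fenwick layout into a plain prefix table,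
--     # so the bisection below does O(1) lookups instead of Fenwick walks
--     pref = [0]
--     for i in range(1, n):
--         pref.append(s[i] + pref[i - (i & -i)])
--     tt = pref[-1]
--     beg, end = 0, n
--     while beg < end:
--         mid = (beg + end) // 2
--         if tt - pref[mid] >= k:
--             beg = mid + 1
--         else:
--             end = mid
--     return end
-- ===== Notes on version B (the rewrite author's own statement) =====
-- stated objective: alternative
-- what changed: B converts the Fenwick-tree layout into a plain prefix-sum table in one linear pass, so the bisection does O(1) table lookups instead of an O(log n) Fenwick walk per probe; A's per-probe tree walks disappear.
import Mathlib
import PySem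

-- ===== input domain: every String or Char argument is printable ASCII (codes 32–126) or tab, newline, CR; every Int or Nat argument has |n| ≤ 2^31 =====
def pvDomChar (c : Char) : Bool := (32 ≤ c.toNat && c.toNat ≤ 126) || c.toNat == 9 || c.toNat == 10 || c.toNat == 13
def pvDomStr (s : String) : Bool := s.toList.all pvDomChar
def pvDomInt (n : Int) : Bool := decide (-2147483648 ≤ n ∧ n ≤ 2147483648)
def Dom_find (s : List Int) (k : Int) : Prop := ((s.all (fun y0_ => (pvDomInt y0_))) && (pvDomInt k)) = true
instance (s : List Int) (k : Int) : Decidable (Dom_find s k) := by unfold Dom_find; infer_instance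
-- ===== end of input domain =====

-- B replaces A's per-probe Fenwick-tree walks by one linear pass that converts the Fenwick
-- layout into a plain prefix table, so the bisection does O(1) lookups (objective: alternative).
-- Equivalence is about the return value; neither program mutates its arguments.

-- termination fact for the ports' Fenwick index step i := i - (i & -i), cited by decreasing_by
theorem pvLowbit_toNat_lt (i : Int) (h : 0 < i) :
    (i - PySem.Int.band i (-i)).toNat < i.toNat := by
  have h1 : (0:Int) ≤ i := le_of_lt h
  have h2 : ¬ (0:Int) ≤ -i := by omega
  have h3 : (-(-i) - 1).toNat = i.toNat - 1 := by omega
  have hle : i.toNat &&& (i.toNat - 1) ≤ i.toNat - 1 := Nat.and_le_right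
  simp only [PySem.Int.band, if_pos h1, if_neg h2, h3]
  omega

-- ===== PORT A =====
-- Python's `get(s, i)`: `while i != 0: ret += s[i]; i -= i & -i`.
-- The guard is `0 < i`: for i < 0 Python indexes from the back and finally raises IndexError,
-- which is reachable only via find([], k) (n-1 = -1), excluded by Pre_find; s[i] is always
-- in range under Pre_find, so the total pyGetD form is exact there.
def find_get (s : List Int) (i ret : Int) : Int :=
  if h : 0 < i then
    find_get s (i - PySem.Int.band i (-i)) (ret + PySem.List.pyGetD s i 0)
  else ret
termination_by i.toNat
decreasing_by exact pvLowbit_toNat_lt i h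

-- Python's `while beg < end` bisection in `find`
def find_loop (s : List Int) (tt k beg e : Int) : Int :=
  if h : beg < e then
    let mid := PySem.Int.floordiv (beg + e) 2
    let t := find_get s mid 0
    if k ≤ tt - t then find_loop s tt k (mid + 1) e
    else find_loop s tt k beg mid
  else e
termination_by (e - beg).toNat
decreasing_by
  · have hb := (PySem.Int.floordiv_two_mid_bounds (le_of_lt h)).1
    omega
  · have hl : PySem.Int.floordiv (beg + e) 2 < e := by
      rw [PySem.Int.floordiv_lt_iff_lt_mul (by omega)]; omega
    have hb := (PySem.Int.floordiv_two_mid_bounds (le_of_lt h)).1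
    omega

def find (s : List Int) (k : Int) : Int :=
  let n : Int := s.length
  let tt := find_get s (n - 1) 0
  find_loop s tt k 0 n

-- ===== PORT B =====
-- bisection of Source B, looking prefix sums up in the precomputed table
def find_alt_loop (pref : List Int) (tt k beg e : Int) : Int :=
  if h : beg < e then
    let mid := PySem.Int.floordiv (beg + e) 2
    if k ≤ tt - PySem.List.pyGetD pref mid 0 then find_alt_loop pref tt k (mid + 1) e
    else find_alt_loop pref tt k beg mid
  else e
termination_by (e - beg).toNat
decreasing_by
  · have hb := (PySem.Int.floordiv_two_mid_bounds (le_of_lt h)).1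
    omega
  · have hl : PySem.Int.floordiv (beg + e) 2 < e := by
      rw [PySem.Int.floordiv_lt_iff_lt_mul (by omega)]; omega
    have hb := (PySem.Int.floordiv_two_mid_bounds (le_of_lt h)).1
    omega

def find_alt (s : List Int) (k : Int) : Int :=
  let n : Int := s.length
  -- pref = [0]; for i in range(1, n): pref.append(s[i] + pref[i - (i & -i)])
  let pref := (PySem.List.pyRange 1 n 1).foldl
    (fun pref i =>
      pref ++ [PySem.List.pyGetD s i 0 + PySem.List.pyGetD pref (i - PySem.Int.band i (-i)) 0])
    [0]
  let tt := PySem.List.pyGetD pref (-1) 0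
  find_alt_loop pref tt k 0 n

-- ===== PRECONDITION & SPEC =====
-- Pre_ excludes only the empty list, on which A raises IndexError (get(s, -1) walks off the list)
def Pre_find (s : List Int) (k : Int) : Prop := s ≠ []
instance (s : List Int) (k : Int) : Decidable (Pre_find s k) := by unfold Pre_find; infer_instance
def pvWitness_find : List Int × Int := ([1, 2], 0)

def Spec_find (s : List Int) (k : Int) (out : Int) : Prop := out = find_alt s k
instance (s : List Int) (k : Int) (out : Int) : Decidable (Spec_find s k out) := by unfold Spec_find; infer_instance

-- ===== CLAIM (what is proved, stated in full; the proofs are below) =====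
def Claim_equal_find : Prop := ∀ (s : List Int) (k : Int), Dom_find s k → Pre_find s k → Spec_find s k (find s k)

-- ===== LEMMAS AND PROOFS =====

theorem pvLowbit_facts (i : Int) (h : 0 < i) :
    i - PySem.Int.band i (-i) = ((i.toNat &&& (i.toNat - 1) : Nat) : Int) := by
  have h1 : (0:Int) ≤ i := le_of_lt h
  have h2 : ¬ (0:Int) ≤ -i := by omega
  have h3 : (-(-i) - 1).toNat = i.toNat - 1 := by omega
  have hle : i.toNat &&& (i.toNat - 1) ≤ i.toNat - 1 := Nat.and_le_right
  simp only [PySem.Int.band, if_pos h1, if_neg h2, h3]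
  omega

theorem find_get_acc (m : Nat) (s : List Int) (i ret : Int) (hm : i.toNat ≤ m) :
    find_get s i ret = ret + find_get s i 0 := by
  induction m generalizing i ret with
  | zero =>
    have h : ¬ 0 < i := by omega
    rw [find_get, dif_neg h]; conv_rhs => rw [find_get, dif_neg h]
    ring
  | succ m ih =>
    by_cases h : 0 < i
    · have hlt := pvLowbit_toNat_lt i h
      rw [find_get, dif_pos h]; conv_rhs => rw [find_get, dif_pos h]
      rw [ih _ _ (by omega)]
      conv_rhs => rw [ih (i - PySem.Int.band i (-i)) (0 + PySem.List.pyGetD s i 0) (by omega)]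
      ring
    · rw [find_get, dif_neg h]; conv_rhs => rw [find_get, dif_neg h]
      ring

theorem pref_spec (s : List Int) (m : Nat) (hm : (m : Int) < s.length) :
    ((PySem.List.pyRange 1 ((m:Int)+1) 1).foldl
      (fun pref i =>
        pref ++ [PySem.List.pyGetD s i 0 + PySem.List.pyGetD pref (i - PySem.Int.band i (-i)) 0])
      [0]).length = m + 1 ∧
    ∀ j : Nat, j ≤ m →
      ((PySem.List.pyRange 1 ((m:Int)+1) 1).foldl
        (fun pref i =>
          pref ++ [PySem.List.pyGetD s i 0 + PySem.List.pyGetD pref (i - PySem.Int.band i (-i)) 0])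
        [0]).getD j 0 = find_get s (j : Int) 0 := by
  induction m with
  | zero =>
    rw [PySem.List.pyRange_one_eq_nil (by norm_num), List.foldl_nil]
    refine ⟨rfl, fun j hj => ?_⟩
    interval_cases j
    rw [find_get, dif_neg (by norm_num)]
    rfl
  | succ m ih =>
    obtain ⟨ihl, ihv⟩ := ih (by push_cast at hm ⊢; omega)
    have hsplit : PySem.List.pyRange 1 ((((m:Nat)+1 : Nat) : Int)+1) 1
        = PySem.List.pyRange 1 ((m:Int)+1) 1 ++ [(m:Int)+1] := by
      have h := PySem.List.pyRange_one_succ_right (a := 1) (b := (m:Int)+1) (by omega)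
      push_cast at h ⊢
      exact h
    rw [hsplit, List.foldl_append, List.foldl_cons, List.foldl_nil]
    set Pm := (PySem.List.pyRange 1 ((m:Int)+1) 1).foldl
      (fun pref i =>
        pref ++ [PySem.List.pyGetD s i 0 + PySem.List.pyGetD pref (i - PySem.Int.band i (-i)) 0])
      [0] with hPm
    have hpos : (0:Int) < (m:Int)+1 := by omega
    have hfacts := pvLowbit_facts ((m:Int)+1) hpos
    have htn : ((m:Int)+1).toNat = m + 1 := by omega
    rw [htn] at hfacts
    have hand : (m+1) &&& (m+1-1) ≤ m+1-1 := Nat.and_le_right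
    -- the appended element equals find_get s (m+1) 0
    have hidx : PySem.List.pyGetD Pm ((m:Int)+1 - PySem.Int.band ((m:Int)+1) (-((m:Int)+1))) 0
        = find_get s (((m+1) &&& (m+1-1) : Nat) : Int) 0 := by
      rw [hfacts, PySem.List.pyGetD_natCast]
      exact ihv _ (by omega)
    have hx : PySem.List.pyGetD s ((m:Int)+1) 0
          + PySem.List.pyGetD Pm ((m:Int)+1 - PySem.Int.band ((m:Int)+1) (-((m:Int)+1))) 0
        = find_get s ((m:Int)+1) 0 := by
      rw [hidx]
      conv_rhs => rw [find_get, dif_pos hpos,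
        find_get_acc ((m:Int)+1 - PySem.Int.band ((m:Int)+1) (-((m:Int)+1))).toNat s _ _ le_rfl,
        hfacts]
      ring
    constructor
    · simp [ihl]
    · intro j hj
      rcases Nat.lt_or_ge j (m+1) with hj' | hj'
      · rw [List.getD_append _ _ _ _ (by omega)]
        exact ihv j (by omega)
      · have hjm : j = m + 1 := by omega
        subst hjm
        rw [List.getD_eq_getElem _ _ (by simp [ihl])]
        have : (Pm ++ [PySem.List.pyGetD s ((m:Int)+1) 0
            + PySem.List.pyGetD Pm ((m:Int)+1 - PySem.Int.band ((m:Int)+1) (-((m:Int)+1))) 0])[m+1]'(by simp [ihl])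
            = PySem.List.pyGetD s ((m:Int)+1) 0
            + PySem.List.pyGetD Pm ((m:Int)+1 - PySem.Int.band ((m:Int)+1) (-((m:Int)+1))) 0 := by
          have hlen : m + 1 = Pm.length := ihl.symm
          simp [List.getElem_append_right, ihl]
        rw [this, hx]
        norm_num

theorem loop_eq (s P : List Int) (tt k : Int)
    (hP : ∀ j : Nat, (j:Int) < s.length → P.getD j 0 = find_get s (j:Int) 0)
    (fuel : Nat) (beg e : Int) (hf : (e - beg).toNat ≤ fuel) (hb : 0 ≤ beg)
    (he : e ≤ s.length) :
    find_loop s tt k beg e = find_alt_loop P tt k beg e := by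
  induction fuel generalizing beg e with
  | zero =>
    have h : ¬ beg < e := by omega
    rw [find_loop, dif_neg h, find_alt_loop, dif_neg h]
  | succ fuel ih =>
    by_cases h : beg < e
    · rw [find_loop, dif_pos h, find_alt_loop, dif_pos h]
      simp only []
      have hmid1 := (PySem.Int.floordiv_two_mid_bounds (le_of_lt h)).1
      have hmid2 : PySem.Int.floordiv (beg + e) 2 < e := by
        rw [PySem.Int.floordiv_lt_iff_lt_mul (by omega)]; omega
      set mid := PySem.Int.floordiv (beg + e) 2 with hmid
      clear_value mid
      have hmt : mid = ((mid.toNat : Nat) : Int) := by omega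
      have ht : PySem.List.pyGetD P mid 0 = find_get s mid 0 := by
        rw [hmt, PySem.List.pyGetD_natCast]
        exact hP mid.toNat (by omega)
      rw [ht]
      split_ifs with hc
      · exact ih (mid + 1) e (by omega) (by omega) he
      · exact ih beg mid (by omega) hb (by omega)
    · rw [find_loop, dif_neg h, find_alt_loop, dif_neg h]

-- ===== VERDICT (by name: the statement is the Claim_ definition above) =====
theorem find_spec : Claim_equal_find := by
  intro s k _ hpre
  show find s k = find_alt s k
  have hlen : 0 < s.length := List.length_pos_iff.mpr hpre
  simp only [find, find_alt]
  have hm0 : ((s.length - 1 : Nat) : Int) + 1 = (s.length : Int) := by omega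
  obtain ⟨hPl, hPv⟩ := pref_spec s (s.length - 1) (by omega)
  rw [hm0] at hPl hPv
  set P := (PySem.List.pyRange 1 ((s.length : Nat) : Int) 1).foldl
    (fun pref i =>
      pref ++ [PySem.List.pyGetD s i 0 + PySem.List.pyGetD pref (i - PySem.Int.band i (-i)) 0])
    [0] with hPdef
  have hPne : P ≠ [] := by
    intro hnil
    rw [hnil] at hPl
    simp at hPl
  have htt : PySem.List.pyGetD P (-1) 0 = find_get s (((s.length : Nat) : Int) - 1) 0 := by
    rw [PySem.List.pyGetD_neg_one P 0 hPne, List.getLast_eq_getElem hPne,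
      ← List.getD_eq_getElem _ 0 (by omega), hPl, Nat.add_sub_cancel,
      hPv (s.length - 1) le_rfl]
    congr 1
    omega
  rw [htt]
  exact loop_eq s P (find_get s (((s.length : Nat) : Int) - 1) 0) k
    (fun j hj => hPv j (by omega)) s.length 0 ((s.length : Nat) : Int) (by omega) (by omega) (by omega)
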